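-- pv_equiv track=rewrite | github.com/wishhyt/ei-beginners | src/ei_beginners/embodied/planning/rule_planner.py | _find_container
-- ===== SOURCE A (Python) =====
-- def _find_container(scene_objects: list[str]) -> str:
--     for obj in sorted(scene_objects):
--         lowered = obj.lower()
--         if (
--             lowered.startswith("basket")
--             or lowered.startswith("tray")
--             or lowered.startswith("bowl")
--         ):
--             return obj
--     return sorted(scene_objects)[-1] if scene_objects else "container_0"
-- ===== SOURCE B (Python) =====
-- def _find_container(scene_objects: list[str]) -> str:
--     best = None      # lexicographically smallest matching object
--     biggest = None   # lexicographically largest object overall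
--     for obj in scene_objects:
--         if obj.lower().startswith(("basket", "tray", "bowl")):
--             if best is None or obj < best:
--                 best = obj
--         if biggest is None or obj > biggest:
--             biggest = obj
--     if best is not None:
--         return best
--     return biggest if biggest is not None else "container_0"
-- ===== Notes on version B (the rewrite author's own statement) =====
-- stated objective: faster
-- what changed: Replaces sorting the whole list (twice in the worst case) with a single linear pass that tracks the smallest container-prefixed object and the largest object overall.
import Mathlib
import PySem

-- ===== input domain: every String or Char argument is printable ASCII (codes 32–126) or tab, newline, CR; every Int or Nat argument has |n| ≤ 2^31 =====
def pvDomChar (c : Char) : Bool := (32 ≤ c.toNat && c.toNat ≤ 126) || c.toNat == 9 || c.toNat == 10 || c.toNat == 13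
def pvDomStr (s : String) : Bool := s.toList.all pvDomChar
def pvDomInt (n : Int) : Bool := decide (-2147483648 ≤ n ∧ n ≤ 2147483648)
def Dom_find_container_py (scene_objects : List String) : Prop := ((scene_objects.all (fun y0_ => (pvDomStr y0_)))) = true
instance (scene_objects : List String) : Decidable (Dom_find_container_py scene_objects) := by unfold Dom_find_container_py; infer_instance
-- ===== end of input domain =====

-- B replaces A's sort (and the second sort in the fallback) by one linear pass that
-- tracks the smallest container-prefixed object and the largest object overall.

-- ===== PORT A =====
-- 'obj.lower().startswith(("basket", …))' test shared by both ports (a pure helper)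
def pvIsCont (obj : String) : Bool :=
  let lowered := PySem.Str.lower obj
  PySem.Str.startswith lowered "basket" ||
  PySem.Str.startswith lowered "tray" ||
  PySem.Str.startswith lowered "bowl"

-- the 'for obj in sorted(...): if …: return obj' loop
def pvLoopA : List String → Option String
  | [] => none
  | obj :: rest => if pvIsCont obj then some obj else pvLoopA rest

def find_container_py (scene_objects : List String) : String :=
  match pvLoopA (PySem.List.sorted scene_objects (fun x => x) false) with
  | some obj => obj
  | none =>
    if scene_objects ≠ [] then
      -- sorted(scene_objects)[-1]; the list is nonempty here, so pyGet? is never none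
      (PySem.List.pyGet? (PySem.List.sorted scene_objects (fun x => x) false) (-1)).getD "container_0"
    else "container_0"

-- ===== PORT B =====
-- one step of B's single pass: update (best, biggest)
def pvStepB (acc : Option String × Option String) (obj : String) :
    Option String × Option String :=
  let best :=
    if pvIsCont obj then
      match acc.1 with
      | none => some obj
      | some b => if obj < b then some obj else some b
    else acc.1
  let biggest :=
    match acc.2 with
    | none => some obj
    | some g => if g < obj then some obj else some g
  (best, biggest)

def find_container_py_alt (scene_objects : List String) : String :=
  match scene_objects.foldl pvStepB (none, none) with
  | (some b, _) => b
  | (none, some g) => g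
  | (none, none) => "container_0"

-- ===== PRECONDITION & SPEC =====
def Spec_find_container_py (scene_objects : List String) (out : String) : Prop := out = find_container_py_alt scene_objects
instance (scene_objects : List String) (out : String) : Decidable (Spec_find_container_py scene_objects out) := by unfold Spec_find_container_py; infer_instance

-- ===== CLAIM (what is proved, stated in full; the proofs are below) =====
def Claim_equal_find_container_py : Prop := ∀ (scene_objects : List String), Dom_find_container_py scene_objects → Spec_find_container_py scene_objects (find_container_py scene_objects)

-- ===== LEMMAS AND PROOFS =====

-- A's loop over a list returns the head of its filtered sublist
theorem pvLoopA_eq_head? (l : List String) :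
    pvLoopA l = (l.filter pvIsCont).head? := by
  induction l with
  | nil => rfl
  | cons x t ih =>
    by_cases h : pvIsCont x = true <;> simp [pvLoopA, h, ih]

-- min?/max? of String lists are permutation-invariant (antisymmetry)
theorem strMin?_perm {l m : List String} (h : l.Perm m) : l.min? = m.min? := by
  match hl : l.min?, hm : m.min? with
  | none, none => rfl
  | none, some b =>
    rw [List.min?_eq_none_iff] at hl; subst hl
    rw [h.symm.eq_nil] at hm; simp at hm
  | some a, none =>
    rw [List.min?_eq_none_iff] at hm; subst hm
    rw [h.eq_nil] at hl; simp at hl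
  | some a, some b =>
    obtain ⟨ha, hal⟩ := List.min?_eq_some_iff.mp hl
    obtain ⟨hb, hbm⟩ := List.min?_eq_some_iff.mp hm
    have h1 : a ≤ b := hal b (h.symm.subset hb)
    have h2 : b ≤ a := hbm a (h.subset ha)
    exact congrArg some (le_antisymm h1 h2)

theorem strMax?_perm {l m : List String} (h : l.Perm m) : l.max? = m.max? := by
  match hl : l.max?, hm : m.max? with
  | none, none => rfl
  | none, some b =>
    rw [List.max?_eq_none_iff] at hl; subst hl
    rw [h.symm.eq_nil] at hm; simp at hm
  | some a, none =>
    rw [List.max?_eq_none_iff] at hm; subst hm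
    rw [h.eq_nil] at hl; simp at hl
  | some a, some b =>
    obtain ⟨ha, hal⟩ := List.max?_eq_some_iff.mp hl
    obtain ⟨hb, hbm⟩ := List.max?_eq_some_iff.mp hm
    exact congrArg some (le_antisymm (hbm a (h.subset ha)) (hal b (h.symm.subset hb)))

-- head of a ≤-sorted list is its min?
theorem head?_eq_min?_of_pairwise {l : List String}
    (h : l.Pairwise (· ≤ ·)) : l.head? = l.min? := by
  cases l with
  | nil => rfl
  | cons x t =>
    have hx : ∀ b ∈ x :: t, x ≤ b := by
      intro b hb
      rcases List.mem_cons.mp hb with rfl | hb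
      · exact le_refl _
      · exact (List.pairwise_cons.mp h).1 b hb
    have : (x :: t).min? = some x :=
      List.min?_eq_some_iff.mpr ⟨List.mem_cons_self .., hx⟩
    simp [this]

-- last of a ≤-sorted list is its max?
theorem getLast?_eq_max?_of_pairwise {l : List String}
    (h : l.Pairwise (· ≤ ·)) : l.getLast? = l.max? := by
  rw [← List.head?_reverse]
  have hr : l.reverse.Pairwise (fun a b => b ≤ a) := by
    rw [List.pairwise_reverse]; exact h
  cases hrl : l.reverse with
  | nil => simp [List.reverse_eq_nil_iff.mp hrl]
  | cons x t =>
    rw [hrl] at hr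
    have hx : ∀ b ∈ l, b ≤ x := by
      intro b hb
      have : b ∈ x :: t := by rw [← hrl]; simpa using hb
      rcases List.mem_cons.mp this with rfl | hb'
      · exact le_refl _
      · exact (List.pairwise_cons.mp hr).1 b hb'
    have hxl : x ∈ l := by
      have : x ∈ l.reverse := by rw [hrl]; exact List.mem_cons_self ..
      simpa using this
    have hmx : l.max? = some x := List.max?_eq_some_iff.mpr ⟨hxl, hx⟩
    rw [hmx]; rfl

-- accumulator updates used to characterise B's fold
def pvUpdMin (o : Option String) (x : String) : Option String :=
  match o with
  | none => some x
  | some b => if x < b then some x else some b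

def pvUpdMax (o : Option String) (x : String) : Option String :=
  match o with
  | none => some x
  | some g => if g < x then some x else some g

theorem pvStepB_eq (acc : Option String × Option String) (x : String) :
    pvStepB acc x =
      ((if pvIsCont x then pvUpdMin acc.1 x else acc.1), pvUpdMax acc.2 x) := by
  obtain ⟨b, g⟩ := acc
  cases b <;> cases g <;> simp [pvStepB, pvUpdMin, pvUpdMax]

theorem foldB_eq (xs : List String) (b g : Option String) :
    xs.foldl pvStepB (b, g) =
      ((xs.filter pvIsCont).foldl pvUpdMin b, xs.foldl pvUpdMax g) := by
  induction xs generalizing b g with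
  | nil => rfl
  | cons x t ih =>
    simp only [List.foldl_cons, pvStepB_eq, List.filter_cons]
    by_cases h : pvIsCont x = true <;> simp [h, ih]

theorem foldl_pvUpdMin_some (l : List String) (b : String) :
    l.foldl pvUpdMin (some b) = some (l.foldl min b) := by
  induction l generalizing b with
  | nil => rfl
  | cons x t ih =>
    have : pvUpdMin (some b) x = some (min b x) := by
      by_cases h : x < b
      · simp [pvUpdMin, h, min_eq_right (le_of_lt h)]
      · simp [pvUpdMin, h, min_eq_left (le_of_not_gt h)]
    simp [this, ih]

theorem foldl_pvUpdMax_some (l : List String) (g : String) :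
    l.foldl pvUpdMax (some g) = some (l.foldl max g) := by
  induction l generalizing g with
  | nil => rfl
  | cons x t ih =>
    have : pvUpdMax (some g) x = some (max g x) := by
      by_cases h : g < x
      · simp [pvUpdMax, h, max_eq_right (le_of_lt h)]
      · simp [pvUpdMax, h, max_eq_left (le_of_not_gt h)]
    simp [this, ih]

theorem foldl_pvUpdMin_none (l : List String) : l.foldl pvUpdMin none = l.min? := by
  cases l with
  | nil => rfl
  | cons x t => simp [pvUpdMin, foldl_pvUpdMin_some, List.min?]

theorem foldl_pvUpdMax_none (l : List String) : l.foldl pvUpdMax none = l.max? := by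
  cases l with
  | nil => rfl
  | cons x t => simp [pvUpdMax, foldl_pvUpdMax_some, List.max?]

theorem alt_eq (xs : List String) :
    find_container_py_alt xs =
      match (xs.filter pvIsCont).min?, xs.max? with
      | some b, _ => b
      | none, some g => g
      | none, none => "container_0" := by
  unfold find_container_py_alt
  rw [foldB_eq, foldl_pvUpdMin_none, foldl_pvUpdMax_none]
  cases (xs.filter pvIsCont).min? <;> cases xs.max? <;> rfl

-- ===== VERDICT (by name: the statement is the Claim_ definition above) =====
theorem find_container_py_spec : Claim_equal_find_container_py := by
  intro xs _
  unfold Spec_find_container_py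
  rw [alt_eq]
  unfold find_container_py
  set s := PySem.List.sorted xs (fun x => x) false with hs
  have hperm : s.Perm xs := PySem.List.sorted_perm xs (fun x => x) false
  have hpair : s.Pairwise (· ≤ ·) := by
    have := PySem.List.sorted_pairwise xs (fun x => x)
    rw [← hs] at this; exact this
  have hfmin : (s.filter pvIsCont).min? = (xs.filter pvIsCont).min? :=
    strMin?_perm (hperm.filter _)
  rw [pvLoopA_eq_head?, head?_eq_min?_of_pairwise (hpair.filter _), hfmin]
  cases hmin : (xs.filter pvIsCont).min? with
  | some b => rfl
  | none =>
    cases xs with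
    | nil =>
      have : s = [] := List.Perm.eq_nil hperm
      simp
    | cons x t =>
      have hne : x :: t ≠ [] := by simp
      simp only [hne, ne_eq, not_false_iff, if_pos]
      have hsne : s ≠ [] := by
        intro h; rw [h] at hperm; exact hne (List.Perm.nil_eq hperm).symm
      rw [PySem.List.pyGet?_neg_one, getLast?_eq_max?_of_pairwise hpair,
        strMax?_perm hperm]
      cases hmax : (x :: t).max? with
      | none => simp at hmax
      | some g => rfl
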